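-- pv_equiv track=rewrite | github.com/deniseiras/PyStudy | g_1_interv.py | count_l_by_R
-- ===== SOURCE A (Python) =====
-- def count_l_by_R(str_tested):
--     r_position = 0
--     l_counter = 0
--
--     arr_els_by_r = []
--     arr_els = []
--     for char in str_tested:
--         if char == "L":
--             arr_els.append([r_position, l_counter])
--             l_counter += 1
--
--         if char == "R":
--             pair_R_L = [r_position, l_counter]
--             arr_els_by_r.append(pair_R_L)
--
--         r_position += 1
--
--     return arr_els_by_r, arr_els
-- ===== SOURCE B (Python) =====
-- def count_l_by_R(str_tested):
--     # prefix-table decomposition: the k-th L yields [pos, k]; each R reads the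
--     # precomputed count of L's strictly before it.
--     l_positions = [i for i, c in enumerate(str_tested) if c == "L"]
--     arr_els = [[pos, k] for k, pos in enumerate(l_positions)]
--     prefix = [0]
--     for c in str_tested:
--         prefix.append(prefix[-1] + (c == "L"))
--     arr_els_by_r = [[i, p] for (i, c), p in zip(enumerate(str_tested), prefix) if c == "R"]
--     return arr_els_by_r, arr_els
-- ===== Notes on version B (the rewrite author's own statement) =====
-- stated objective: alternative
-- what changed: Replaces the single stateful scan with two counters by a declarative decomposition: enumerate-and-filter the L positions (the counter for the k-th L is just k) plus a precomputed prefix-count table of L's read at each R position.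
import Mathlib
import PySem

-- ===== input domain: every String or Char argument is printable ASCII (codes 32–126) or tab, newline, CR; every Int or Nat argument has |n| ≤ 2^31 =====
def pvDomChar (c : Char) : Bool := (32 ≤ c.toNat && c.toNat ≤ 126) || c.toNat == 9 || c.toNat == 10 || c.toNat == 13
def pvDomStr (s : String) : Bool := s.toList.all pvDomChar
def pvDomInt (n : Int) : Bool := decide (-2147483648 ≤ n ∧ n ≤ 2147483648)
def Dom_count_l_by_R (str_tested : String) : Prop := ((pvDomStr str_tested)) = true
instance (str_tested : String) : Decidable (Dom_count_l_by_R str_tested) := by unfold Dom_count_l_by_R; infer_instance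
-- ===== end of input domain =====

-- B replaces A's single stateful scan by an enumerate/filter pass for the L's plus a
-- prefix-count table read at each R (alternative decomposition, same O(n) cost).


-- ===== PORT A =====
-- A's for-loop over the characters with mutable r_position, l_counter and the two arrays.
def pvLoopA : List Char → Int → Int → List (List Int) → List (List Int) → List (List Int) × List (List Int)
  | [], _, _, byR, els => (byR, els)
  | c :: cs, rpos, lc, byR, els =>
    let els' := if c == 'L' then els ++ [[rpos, lc]] else els
    let lc' := if c == 'L' then lc + 1 else lc
    let byR' := if c == 'R' then byR ++ [[rpos, lc']] else byR
    pvLoopA cs (rpos + 1) lc' byR' els'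

def count_l_by_R (str_tested : String) : List (List Int) × List (List Int) :=
  pvLoopA str_tested.toList 0 0 [] []

-- ===== PORT B =====
-- prefix = [0]; for c in s: prefix.append(prefix[-1] + (c == "L"))
def pvScanPrefix (acc : Int) : List Char → List Int
  | [] => [acc]
  | c :: cs => acc :: pvScanPrefix (acc + (if c == 'L' then 1 else 0)) cs

def count_l_by_R_alt (str_tested : String) : List (List Int) × List (List Int) :=
  let cs := str_tested.toList
  let l_positions := ((PySem.List.enumerate cs 0).filter (fun p => p.2 == 'L')).map (·.1)
  let arr_els := (PySem.List.enumerate l_positions 0).map (fun p => [p.2, p.1])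
  let pfx := pvScanPrefix 0 cs
  let arr_els_by_r := ((PySem.List.enumerate cs 0).zip pfx).filterMap
      (fun q => if q.1.2 == 'R' then some [q.1.1, q.2] else none)
  (arr_els_by_r, arr_els)

-- ===== PRECONDITION & SPEC =====
def Spec_count_l_by_R (str_tested : String) (out : List (List Int) × List (List Int)) : Prop := out = count_l_by_R_alt str_tested
instance (str_tested : String) (out : List (List Int) × List (List Int)) : Decidable (Spec_count_l_by_R str_tested out) := by unfold Spec_count_l_by_R; infer_instance

-- ===== CLAIM (what is proved, stated in full; the proofs are below) =====
def Claim_equal_count_l_by_R : Prop := ∀ (str_tested : String), Dom_count_l_by_R str_tested → Spec_count_l_by_R str_tested (count_l_by_R str_tested)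

-- ===== LEMMAS AND PROOFS =====

-- canonical form both sides are reduced to
def gEls : List Char → Int → Int → List (List Int)
  | [], _, _ => []
  | c :: cs, rpos, lc =>
    if c == 'L' then [rpos, lc] :: gEls cs (rpos + 1) (lc + 1) else gEls cs (rpos + 1) lc

def gByR : List Char → Int → Int → List (List Int)
  | [], _, _ => []
  | c :: cs, rpos, lc =>
    let lc' := if c == 'L' then lc + 1 else lc
    if c == 'R' then [rpos, lc] :: gByR cs (rpos + 1) lc' else gByR cs (rpos + 1) lc'

lemma loopA_eq (cs : List Char) : ∀ (rpos lc : Int) (byR els : List (List Int)),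
    pvLoopA cs rpos lc byR els = (byR ++ gByR cs rpos lc, els ++ gEls cs rpos lc) := by
  induction cs with
  | nil => intro rpos lc byR els; simp [pvLoopA, gByR, gEls]
  | cons c cs ih =>
    intro rpos lc byR els
    by_cases hL : c = 'L'
    · subst hL
      simp [pvLoopA, gByR, gEls, ih]
    · by_cases hR : c = 'R'
      · subst hR
        simp [pvLoopA, gByR, gEls, ih]
      · simp [pvLoopA, gByR, gEls, ih, hL, hR]

lemma els_eq (cs : List Char) : ∀ (n k : Int),
    (PySem.List.enumerate (((PySem.List.enumerate cs n).filter (fun p => p.2 == 'L')).map (·.1)) k).map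
      (fun p => [p.2, p.1]) = gEls cs n k := by
  induction cs with
  | nil => intro n k; simp [PySem.List.enumerate_nil, gEls]
  | cons c cs ih =>
    intro n k
    by_cases hL : c = 'L'
    · subst hL
      simp [PySem.List.enumerate_cons, gEls, ih]
    · simp [PySem.List.enumerate_cons, gEls, hL, ih]

lemma byR_eq (cs : List Char) : ∀ (n acc : Int),
    ((PySem.List.enumerate cs n).zip (pvScanPrefix acc cs)).filterMap
      (fun q => if q.1.2 == 'R' then some [q.1.1, q.2] else none) = gByR cs n acc := by
  induction cs with
  | nil => intro n acc; simp [PySem.List.enumerate_nil, pvScanPrefix, gByR]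
  | cons c cs ih =>
    intro n acc
    by_cases hR : c = 'R'
    · subst hR
      simp only [PySem.List.enumerate_cons, pvScanPrefix, gByR]
      simp only [List.zip_cons_cons, List.filterMap_cons]
      simp
      simpa using ih (n + 1) acc
    · by_cases hL : c = 'L'
      · subst hL
        simp only [PySem.List.enumerate_cons, pvScanPrefix, gByR]
        simp [hR]
        simpa using ih (n + 1) (acc + 1)
      · simp only [PySem.List.enumerate_cons, pvScanPrefix, gByR]
        simp [hR, hL]
        simpa using ih (n + 1) acc

-- ===== VERDICT (by name: the statement is the Claim_ definition above) =====
theorem count_l_by_R_spec : Claim_equal_count_l_by_R := by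
  intro s _
  unfold Spec_count_l_by_R count_l_by_R count_l_by_R_alt
  simp only []
  rw [loopA_eq]
  rw [show (PySem.List.enumerate s.toList) = PySem.List.enumerate s.toList 0 from rfl]
  rw [byR_eq, show (PySem.List.enumerate (List.map (fun x => x.1) (List.filter (fun p => p.2 == 'L') (PySem.List.enumerate s.toList 0)))) = PySem.List.enumerate (List.map (fun x => x.1) (List.filter (fun p => p.2 == 'L') (PySem.List.enumerate s.toList 0))) 0 from rfl, els_eq]
  simp
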